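-- pv_equiv track=rewrite | github.com/falesiani/torch_ga | torch_ga/blades.py | get_normal_ordered
-- ===== SOURCE A (Python) =====
-- from typing import List, Tuple, Union
--
-- def _normal_swap(x: List[str]) -> List[str]:
--     """Swaps the first unordered blade pair and returns the new list as well
--     as whether a swap was performed."""
--     for i in range(len(x) - 1):
--         a, b = x[i], x[i + 1]
--         if a > b:  # string comparison
--             x[i], x[i+1] = b, a
--             return False, x
--     return True, x
--
-- def get_normal_ordered(blade_name: str) -> Tuple[int, str]:
--     """Returns the normal ordered blade name and its sign.
--     Example: 21 => -1, 12
--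
--     Args:
--         blade_name: Blade name for which to return normal ordered
--         name and sign
--
--     Returns:
--         sign: sign of the blade
--         blade_name: normalized name of the blade
--     """
--     blade_name = list(blade_name)
--     sign = -1
--     done = False
--     while not done:
--         sign *= -1
--         done, blade_name = _normal_swap(blade_name)
--     return sign, "".join(blade_name)
-- ===== SOURCE B (Python) =====
-- def _insert(ch, s):
--     """Insert ch into sorted list s; return (#elements of s greater than ch, new list)."""
--     for i in range(len(s)):
--         if s[i] > ch:
--             return len(s) - i, s[:i] + [ch] + s[i:]
--     return 0, s + [ch]
--
-- def get_normal_ordered(blade_name):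
--     s = []
--     inv = 0
--     for ch in blade_name:
--         k, s = _insert(ch, s)
--         inv += k
--     return (-1 if inv % 2 else 1, "".join(s))
-- ===== Notes on version B (the rewrite author's own statement) =====
-- stated objective: faster
-- what changed: A repeatedly rescans the list from the start, performing one adjacent swap per full helper call until sorted; B does a single left-to-right insertion-sort pass that inserts each character into a sorted accumulator and counts the crossed (greater) elements, returning (-1)^inversions directly.
import Mathlib
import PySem

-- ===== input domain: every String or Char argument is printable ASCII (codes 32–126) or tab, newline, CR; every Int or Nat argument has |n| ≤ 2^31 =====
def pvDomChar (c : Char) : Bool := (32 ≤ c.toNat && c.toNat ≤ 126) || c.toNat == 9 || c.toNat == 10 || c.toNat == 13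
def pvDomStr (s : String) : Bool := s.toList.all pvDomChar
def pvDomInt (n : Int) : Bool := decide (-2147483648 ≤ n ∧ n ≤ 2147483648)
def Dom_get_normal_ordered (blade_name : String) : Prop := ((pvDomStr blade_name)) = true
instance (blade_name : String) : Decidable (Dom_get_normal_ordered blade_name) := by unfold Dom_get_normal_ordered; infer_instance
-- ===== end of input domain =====

-- B replaces A's restart-from-scratch adjacent-swap loop by one insertion-sort pass that
-- counts inversions directly (objective: faster; a timing run measures the speedup).

-- ===== PORT A =====
-- inversion count of a list (pairs i < j with x_i > x_j); termination measure for A's while loop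
def invCount : List Char → Nat
  | [] => 0
  | a :: l => l.countP (fun b => decide (b < a)) + invCount l

-- _normal_swap: scan for the first adjacent unordered pair, swap it and stop (False), else True
def normalSwap : List Char → Bool × List Char
  | a :: b :: rest =>
    if b < a then (false, b :: a :: rest)
    else
      let r := normalSwap (b :: rest)
      (r.1, a :: r.2)
  | l => (true, l)

theorem normalSwap_perm : ∀ (l : List Char), (normalSwap l).2.Perm l := by
  intro l
  induction l with
  | nil => simp [normalSwap]
  | cons a t ih =>
    match t, ih with
    | [], _ => simp [normalSwap]
    | b :: rest, ih =>
      by_cases h : b < a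
      · simpa [normalSwap, h] using List.Perm.swap a b rest
      · simpa [normalSwap, h] using (ih).cons a

theorem normalSwap_false_inv : ∀ (l : List Char), (normalSwap l).1 = false →
    invCount (normalSwap l).2 + 1 = invCount l := by
  intro l
  induction l with
  | nil => simp [normalSwap]
  | cons a t ih =>
    match t, ih with
    | [], _ => simp [normalSwap]
    | b :: rest, ih =>
      by_cases h : b < a
      · intro _
        have hab : ¬ a < b := not_lt_of_gt h
        simp only [normalSwap, h, if_true, invCount, List.countP_cons, hab,
          decide_true, decide_false]
        simp only [Bool.false_eq_true, if_true, if_false]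
        omega
      · simp only [normalSwap, h, if_false]
        intro hf
        have hperm := normalSwap_perm (b :: rest)
        have hcnt : (normalSwap (b :: rest)).2.countP (fun c => decide (c < a))
            = (b :: rest).countP (fun c => decide (c < a)) := hperm.countP_eq _
        have := ih hf
        simp only [invCount] at this ⊢
        simp only [hcnt]
        omega

theorem normalSwap_false_dec (l : List Char) (h : (normalSwap l).1 = false) :
    invCount (normalSwap l).2 < invCount l := by
  have := normalSwap_false_inv l h; omega

-- the while loop of get_normal_ordered: sign *= -1; done, blade_name = _normal_swap(blade_name)
def gnoLoop (sign : Int) (l : List Char) : Int × List Char :=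
  let sign' := sign * (-1)
  let r := normalSwap l
  if h : r.1 = true then (sign', r.2)
  else gnoLoop sign' r.2
termination_by invCount l
decreasing_by exact normalSwap_false_dec l (Bool.not_eq_true _ ▸ h)

def get_normal_ordered (blade_name : String) : Int × String :=
  let r := gnoLoop (-1) blade_name.toList
  (r.1, String.mk r.2)

-- ===== PORT B =====
-- _insert: insert ch into sorted s; return (#elements of s greater than ch, new list)
def insertAlt (ch : Char) : List Char → Nat × List Char
  | [] => (0, [ch])
  | b :: s =>
    if ch < b then (s.length + 1, ch :: b :: s)
    else
      let p := insertAlt ch s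
      (p.1, b :: p.2)

def get_normal_ordered_alt (blade_name : String) : Int × String :=
  let r := blade_name.toList.foldl
    (fun (acc : Nat × List Char) ch =>
      let p := insertAlt ch acc.2
      (acc.1 + p.1, p.2)) (0, [])
  ((if r.1 % 2 ≠ 0 then (-1 : Int) else 1), String.mk r.2)

-- ===== PRECONDITION & SPEC =====
def Spec_get_normal_ordered (blade_name : String) (out : Int × String) : Prop := out = get_normal_ordered_alt blade_name
instance (blade_name : String) (out : Int × String) : Decidable (Spec_get_normal_ordered blade_name out) := by unfold Spec_get_normal_ordered; infer_instance

-- ===== CLAIM (what is proved, stated in full; the proofs are below) =====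
def Claim_equal_get_normal_ordered : Prop := ∀ (blade_name : String), Dom_get_normal_ordered blade_name → Spec_get_normal_ordered blade_name (get_normal_ordered blade_name)

-- ===== LEMMAS AND PROOFS =====

theorem sorted_invCount_zero : ∀ (l : List Char), l.Pairwise (· ≤ ·) → invCount l = 0 := by
  intro l h
  induction h with
  | nil => simp [invCount]
  | cons hle _ ih =>
    rename_i a t _
    simp only [invCount, ih, Nat.add_zero]
    rw [List.countP_eq_zero]
    intro b hb
    simpa using not_lt_of_ge (hle b hb)

theorem normalSwap_true : ∀ (l : List Char), (normalSwap l).1 = true →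
    (normalSwap l).2 = l ∧ l.Pairwise (· ≤ ·) := by
  intro l
  induction l with
  | nil => simp [normalSwap]
  | cons a t ih =>
    match t, ih with
    | [], _ => simp [normalSwap]
    | b :: rest, ih =>
      by_cases h : b < a
      · simp [normalSwap, h]
      · simp only [normalSwap, h, if_false]
        intro ht
        obtain ⟨heq, hp⟩ := ih ht
        refine ⟨by simp [heq], ?_⟩
        have hab : a ≤ b := le_of_not_gt h
        refine List.pairwise_cons.mpr ⟨?_, hp⟩
        intro c hc
        rcases List.mem_cons.mp hc with rfl | hc
        · exact hab
        · exact le_trans hab (List.rel_of_pairwise_cons hp hc)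

theorem gnoLoop_spec : ∀ (l : List Char) (sign : Int),
    (gnoLoop sign l).1 = sign * (-1) ^ (invCount l + 1) ∧
    (gnoLoop sign l).2.Perm l ∧ (gnoLoop sign l).2.Pairwise (· ≤ ·) := by
  intro l
  induction hn : invCount l using Nat.strong_induction_on generalizing l with
  | _ n ih =>
    intro sign
    rw [gnoLoop]
    by_cases h : (normalSwap l).1 = true
    · obtain ⟨heq, hp⟩ := normalSwap_true l h
      have h0 : n = 0 := by rw [← hn]; exact sorted_invCount_zero l hp
      subst h0
      simp [h, heq, hp]
    · have hf : (normalSwap l).1 = false := by revert h; cases (normalSwap l).1 <;> simp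
      have hdec := normalSwap_false_inv l hf
      have hlt : invCount (normalSwap l).2 < n := by omega
      obtain ⟨h1, h2, h3⟩ := ih _ hlt (normalSwap l).2 rfl (sign * (-1))
      rw [hf, dif_neg Bool.false_ne_true]
      refine ⟨?_, h2.trans (normalSwap_perm l), h3⟩
      rw [h1, ← hn, ← hdec]
      ring

-- cross s l = Σ_{ch ∈ l} #elements of s greater than ch
def cross (s l : List Char) : Nat :=
  (l.map (fun ch => s.countP (fun b => decide (ch < b)))).sum

theorem cross_nil_left (l : List Char) : cross [] l = 0 := by
  induction l with
  | nil => rfl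
  | cons a t ih => simpa [cross, List.map_cons] using ih

theorem cross_perm {s s' : List Char} (h : s.Perm s') (l : List Char) :
    cross s l = cross s' l := by
  unfold cross
  congr 1
  exact List.map_congr_left (fun ch _ => h.countP_eq _)

theorem cross_cons_left (ch : Char) (s l : List Char) :
    cross (ch :: s) l = l.countP (fun d => decide (d < ch)) + cross s l := by
  induction l with
  | nil => simp [cross]
  | cons d t ih =>
    simp only [cross, List.map_cons, List.sum_cons, List.countP_cons] at *
    by_cases hd : d < ch <;> simp [hd] at ih ⊢ <;> omega

theorem insertAlt_perm (ch : Char) : ∀ (s : List Char), (insertAlt ch s).2.Perm (ch :: s) := by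
  intro s
  induction s with
  | nil => simp [insertAlt]
  | cons b t ih =>
    by_cases h : ch < b
    · simp [insertAlt, h]
    · simpa [insertAlt, h] using (ih.cons b).trans (List.Perm.swap ch b t)

theorem insertAlt_sorted (ch : Char) : ∀ (s : List Char), s.Pairwise (· ≤ ·) →
    (insertAlt ch s).2.Pairwise (· ≤ ·) := by
  intro s
  induction s with
  | nil => simp [insertAlt]
  | cons b t ih =>
    intro hp
    obtain ⟨hb, ht⟩ := List.pairwise_cons.mp hp
    by_cases h : ch < b
    · simp only [insertAlt, h, if_true]
      refine List.pairwise_cons.mpr ⟨?_, hp⟩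
      intro c hc
      rcases List.mem_cons.mp hc with rfl | hc
      · exact le_of_lt h
      · exact le_of_lt (lt_of_lt_of_le h (hb c hc))
    · simp only [insertAlt, h, if_false]
      refine List.pairwise_cons.mpr ⟨?_, ih ht⟩
      intro c hc
      have hm : c ∈ ch :: t := (insertAlt_perm ch t).mem_iff.mp hc
      rcases List.mem_cons.mp hm with rfl | hm
      · exact le_of_not_gt h
      · exact hb c hm

theorem insertAlt_count (ch : Char) : ∀ (s : List Char), s.Pairwise (· ≤ ·) →
    (insertAlt ch s).1 = s.countP (fun b => decide (ch < b)) := by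
  intro s
  induction s with
  | nil => simp [insertAlt]
  | cons b t ih =>
    intro hp
    obtain ⟨hb, ht⟩ := List.pairwise_cons.mp hp
    by_cases h : ch < b
    · simp only [insertAlt, h, if_true, List.countP_cons]
      have : t.countP (fun c => decide (ch < c)) = t.length := by
        rw [List.countP_eq_length]
        intro c hc
        simpa using lt_of_lt_of_le h (hb c hc)
      simp [h, this]
    · simp only [insertAlt, h, if_false, List.countP_cons]
      simp [h, ih ht]

-- invariant of B's foldl
theorem foldB_spec : ∀ (l : List Char) (n : Nat) (s : List Char), s.Pairwise (· ≤ ·) →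
    let r := l.foldl (fun (acc : Nat × List Char) ch =>
      let p := insertAlt ch acc.2
      (acc.1 + p.1, p.2)) (n, s)
    r.1 = n + cross s l + invCount l ∧ r.2.Perm (s ++ l) ∧ r.2.Pairwise (· ≤ ·) := by
  intro l
  induction l with
  | nil =>
    intro n s hs
    simp [cross, invCount, hs]
  | cons ch t ih =>
    intro n s hs
    simp only [List.foldl_cons]
    obtain ⟨h1, h2, h3⟩ := ih (n + (insertAlt ch s).1) (insertAlt ch s).2 (insertAlt_sorted ch s hs)
    refine ⟨?_, ?_, h3⟩
    · rw [h1, insertAlt_count ch s hs,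
        cross_perm (insertAlt_perm ch s) t, cross_cons_left]
      simp only [cross, invCount, List.map_cons, List.sum_cons]
      omega
    · refine h2.trans ?_
      exact ((insertAlt_perm ch s).append_right t).trans (List.perm_middle.symm)

theorem neg_one_pow_mod (n : Nat) :
    ((-1 : Int)) ^ n = if n % 2 ≠ 0 then (-1 : Int) else 1 := by
  rcases Nat.even_or_odd n with he | ho
  · simp [he.neg_one_pow, Nat.even_iff.mp he]
  · simp [ho.neg_one_pow, Nat.odd_iff.mp ho]

-- ===== VERDICT (by name: the statement is the Claim_ definition above) =====
theorem get_normal_ordered_spec : Claim_equal_get_normal_ordered := by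
  intro blade_name _
  unfold Spec_get_normal_ordered get_normal_ordered get_normal_ordered_alt
  obtain ⟨hA1, hA2, hA3⟩ := gnoLoop_spec blade_name.toList (-1)
  obtain ⟨hB1, hB2, hB3⟩ := foldB_spec blade_name.toList 0 [] List.Pairwise.nil
  simp only [List.nil_append] at hB2
  have hlist : (gnoLoop (-1) blade_name.toList).2 =
      (blade_name.toList.foldl (fun (acc : Nat × List Char) ch =>
        let p := insertAlt ch acc.2
        (acc.1 + p.1, p.2)) (0, [])).2 :=
    List.Perm.eq_of_pairwise' hA3 hB3 (hA2.trans hB2.symm)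
  have hsign : (gnoLoop (-1) blade_name.toList).1 =
      (if (blade_name.toList.foldl (fun (acc : Nat × List Char) ch =>
        let p := insertAlt ch acc.2
        (acc.1 + p.1, p.2)) (0, [])).1 % 2 ≠ 0 then (-1 : Int) else 1) := by
    rw [hA1, hB1, ← neg_one_pow_mod]
    rw [cross_nil_left]
    simp [pow_succ]
  exact Prod.ext hsign (congrArg String.mk hlist)
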